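-- pv_equiv track=rewrite | github.com/TheAntelope/Newsletter-pod | scripts/reset_tier_caps.py | trim_weekdays
-- ===== SOURCE A (Python) =====
-- WEEKDAY_ORDER = [
--     "monday",
--     "tuesday",
--     "wednesday",
--     "thursday",
--     "friday",
--     "saturday",
--     "sunday",
-- ]
--
-- MAX_DELIVERY_DAYS = 5
--
-- def trim_weekdays(weekdays: list[str]) -> list[str]:
--     if not weekdays:
--         return ["monday"]
--     keep = set(weekdays)
--     # Drop in reverse order until we fit the cap.
--     for day in reversed(WEEKDAY_ORDER):
--         if len(keep) <= MAX_DELIVERY_DAYS: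
--             break
--         if day in keep:
--             keep.discard(day)
--     # Re-sort canonically.
--     return [d for d in WEEKDAY_ORDER if d in keep]
-- ===== SOURCE B (Python) =====
-- WEEKDAY_ORDER = [
--     "monday",
--     "tuesday",
--     "wednesday",
--     "thursday",
--     "friday",
--     "saturday",
--     "sunday",
-- ]
--
-- MAX_DELIVERY_DAYS = 5
--
-- def trim_weekdays(weekdays: list[str]) -> list[str]:
--     if not weekdays:
--         return ["monday"]
--     days = set(weekdays)
--     valid = [d for d in WEEKDAY_ORDER if d in days]
--     return valid[:MAX_DELIVERY_DAYS]
-- ===== Notes on version B (the rewrite author's own statement) =====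
-- stated objective: simpler
-- what changed: Replaces A's reverse-iteration discard loop over WEEKDAY_ORDER with filtering the canonical order once and taking the first MAX_DELIVERY_DAYS entries.
-- intended difference: On lists with more than 5 distinct entries among which both a real weekday and a non-weekday string occur, A lets the invalid strings consume cap slots and so drops real weekdays from the result; B ignores invalid entries and returns up to 5 valid weekdays, which is the intended trim-to-cap behaviour. — e.g. on trim_weekdays(["monday", "a", "b", "c", "d", "e"]): A returns [], B returns ["monday"]
import Mathlib
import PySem

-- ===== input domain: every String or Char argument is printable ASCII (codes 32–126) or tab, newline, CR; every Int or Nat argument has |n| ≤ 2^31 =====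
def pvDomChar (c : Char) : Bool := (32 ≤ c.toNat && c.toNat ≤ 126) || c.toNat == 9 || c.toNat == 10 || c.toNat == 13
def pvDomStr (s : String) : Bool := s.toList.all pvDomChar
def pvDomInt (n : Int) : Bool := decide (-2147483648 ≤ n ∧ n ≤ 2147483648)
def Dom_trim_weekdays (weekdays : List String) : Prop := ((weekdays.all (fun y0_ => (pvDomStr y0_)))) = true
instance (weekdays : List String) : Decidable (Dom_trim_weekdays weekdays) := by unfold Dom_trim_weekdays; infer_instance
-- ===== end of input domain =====

-- B drops A's reverse discard loop and simply takes the first 5 valid weekdays (objective: simpler);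
-- where non-weekday strings would make A discard real weekdays, B instead ignores them (see D_ below).

-- ===== PORT A =====
def pvWEEKDAY_ORDER : List String :=
  ["monday", "tuesday", "wednesday", "thursday", "friday", "saturday", "sunday"]

def pvMAX_DELIVERY_DAYS : Int := 5

-- 'for day in reversed(WEEKDAY_ORDER): if len(keep) <= MAX_DELIVERY_DAYS: break; if day in keep: keep.discard(day)'
def pvTrimLoop (days : List String) (keep : PySem.Set String) : PySem.Set String :=
  match days with
  | [] => keep
  | d :: ds =>
      if PySem.Set.len keep ≤ pvMAX_DELIVERY_DAYS then keep
      else pvTrimLoop ds (if PySem.Set.contains keep d then PySem.Set.discard keep d else keep)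

def trim_weekdays (weekdays : List String) : List String :=
  if weekdays = [] then ["monday"]
  else
    let keep := pvTrimLoop pvWEEKDAY_ORDER.reverse (PySem.Set.ofList weekdays)
    pvWEEKDAY_ORDER.filter (fun d => PySem.Set.contains keep d)

-- ===== PORT B =====
def trim_weekdays_alt (weekdays : List String) : List String :=
  if weekdays = [] then ["monday"]
  else
    let days := PySem.Set.ofList weekdays
    let valid := pvWEEKDAY_ORDER.filter (fun d => PySem.Set.contains days d)
    PySem.List.slice valid none (some pvMAX_DELIVERY_DAYS)

-- ===== PRECONDITION & SPEC =====
-- On lists with more than 5 distinct entries among which both a real weekday and a non-weekday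
-- string occur, A lets the invalid strings consume cap slots and so drops real weekdays from
-- the result; B ignores invalid entries and returns up to 5 valid weekdays, which is the
-- intended trim-to-cap behaviour.
def pvIsWeekdayName (s : String) : Bool :=
  s == "monday" || s == "tuesday" || s == "wednesday" || s == "thursday" ||
  s == "friday" || s == "saturday" || s == "sunday"

def D_trim_weekdays (weekdays : List String) : Prop :=
  5 < (PySem.List.dedup weekdays).length ∧
  (∃ w ∈ weekdays, pvIsWeekdayName w = true) ∧
  (∃ w ∈ weekdays, pvIsWeekdayName w = false)
instance (weekdays : List String) : Decidable (D_trim_weekdays weekdays) := by unfold D_trim_weekdays; infer_instance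

def Spec_trim_weekdays (weekdays : List String) (out : List String) : Prop :=
  ¬ D_trim_weekdays weekdays → out = trim_weekdays_alt weekdays
instance (weekdays : List String) (out : List String) : Decidable (Spec_trim_weekdays weekdays out) := by unfold Spec_trim_weekdays; infer_instance

def pvDiffWitness_trim_weekdays : List String := ["monday", "a", "b", "c", "d", "e"]
def pvDiffWitnessOut_trim_weekdays : (List String) × (List String) := ([], ["monday"])

-- ===== CLAIM (what is proved, stated in full; the proofs are below) =====
def Claim_unchanged_trim_weekdays : Prop :=
  ∀ (weekdays : List String), Dom_trim_weekdays weekdays → Spec_trim_weekdays weekdays (trim_weekdays weekdays)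
def Claim_changed_trim_weekdays : Prop :=
  Dom_trim_weekdays (pvDiffWitness_trim_weekdays) ∧ D_trim_weekdays (pvDiffWitness_trim_weekdays) ∧
  trim_weekdays (pvDiffWitness_trim_weekdays) = pvDiffWitnessOut_trim_weekdays.1 ∧
  trim_weekdays_alt (pvDiffWitness_trim_weekdays) = pvDiffWitnessOut_trim_weekdays.2 ∧
  pvDiffWitnessOut_trim_weekdays.1 ≠ pvDiffWitnessOut_trim_weekdays.2
def Claim_exact_trim_weekdays : Prop :=
  ∀ (weekdays : List String), Dom_trim_weekdays weekdays → D_trim_weekdays weekdays →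
    trim_weekdays weekdays ≠ trim_weekdays_alt weekdays

-- ===== LEMMAS AND PROOFS =====

-- the loop never adds elements
theorem pvTrimLoop_subset (days : List String) (keep : PySem.Set String) :
    ∀ x, x ∈ pvTrimLoop days keep → x ∈ keep := by
  induction days generalizing keep with
  | nil => intro x hx; simpa [pvTrimLoop] using hx
  | cons d ds ih =>
      intro x hx
      unfold pvTrimLoop at hx
      split at hx
      · exact hx
      · split at hx
        · exact ((PySem.Set.mem_discard _ _ _).1 (ih _ x hx)).1
        · exact ih _ x hx

theorem length_discard_mem (s : PySem.Set String) (d : String)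
    (hnd : s.Nodup) (hd : d ∈ s) : (PySem.Set.discard s d).length = s.length - 1 := by
  induction s with
  | nil => cases hd
  | cons a t ih =>
    rcases List.mem_cons.1 hd with h | h
    · subst h
      have hdt : d ∉ t := (List.nodup_cons.1 hnd).1
      have hft : t.filter (fun y => !y == d) = t := List.filter_eq_self.2 (fun x hx => by
        have hxa : x ≠ d := fun he => hdt (he ▸ hx)
        simp [hxa])
      simp [PySem.Set.discard, hft]
    · have hna : (a == d) = false := by
        have : a ≠ d := fun he => (List.nodup_cons.1 hnd).1 (he ▸ h)
        simp [this]
      have ht := ih (List.nodup_cons.1 hnd).2 h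
      have hpos : 1 ≤ t.length := List.length_pos_of_mem h
      simp [PySem.Set.discard, hna] at ht ⊢
      omega

-- loop characterisation: filtering `order` through the loop result is a take on the filtered
-- original set, dropping the overflow over the cap from the end
theorem pvTrimLoop_filter (order : List String) (keep : PySem.Set String)
    (hord : order.Nodup) (hnd : keep.Nodup) :
    order.filter (fun d => PySem.Set.contains (pvTrimLoop order.reverse keep) d)
      = (order.filter (fun d => PySem.Set.contains keep d)).take
          ((order.filter (fun d => PySem.Set.contains keep d)).length - (keep.length - 5)) := by
  induction order using List.reverseRecOn generalizing keep with
  | nil => simp [pvTrimLoop]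
  | append_singleton os d ih =>
      have hdos : d ∉ os := by
        have := hord; simp [List.nodup_append] at this; tauto
      have hosnd : os.Nodup := (List.nodup_append.1 hord).1
      rw [List.reverse_append]
      simp only [List.reverse_singleton, List.singleton_append]
      by_cases hle : PySem.Set.len keep ≤ pvMAX_DELIVERY_DAYS
      · -- break immediately: loop returns keep, and keep.length - 5 = 0
        have hk5 : keep.length ≤ 5 := by
          simpa [PySem.Set.len, pvMAX_DELIVERY_DAYS] using hle
        rw [show pvTrimLoop (d :: os.reverse) keep = keep by
              simp only [pvTrimLoop]; rw [if_pos hle]]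
        have h0 : keep.length - 5 = 0 := by omega
        rw [h0]
        simp
      · have hk6 : 6 ≤ keep.length := by
          simp [PySem.Set.len, pvMAX_DELIVERY_DAYS] at hle; omega
        rw [show pvTrimLoop (d :: os.reverse) keep
              = pvTrimLoop os.reverse
                  (if PySem.Set.contains keep d then PySem.Set.discard keep d else keep) by
            simp only [pvTrimLoop]; rw [if_neg hle]]
        by_cases hdk : d ∈ keep
        · -- d is discarded
          have hc : PySem.Set.contains keep d = true := by
            simpa [PySem.Set.contains, List.contains_iff_mem] using hdk
          rw [if_pos hc]
          set keep' := PySem.Set.discard keep d with hkeep'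
          have hnd' : keep'.Nodup := PySem.Set.nodup_discard _ _ hnd
          have hlen' : keep'.length = keep.length - 1 := length_discard_mem keep d hnd hdk
          have hdres : d ∉ pvTrimLoop os.reverse keep' := by
            intro h
            have := pvTrimLoop_subset os.reverse keep' d h
            exact ((PySem.Set.mem_discard _ _ _).1 this).2 rfl
          have hcres : PySem.Set.contains (pvTrimLoop os.reverse keep') d = false := by
            simpa [PySem.Set.contains, List.contains_iff_mem] using hdres
          have hfos : os.filter (fun x => PySem.Set.contains keep' x)
              = os.filter (fun x => PySem.Set.contains keep x) := by
            apply List.filter_congr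
            intro x hx
            have hxd : x ≠ d := fun h => hdos (h ▸ hx)
            show List.contains (keep.discard d) x = List.contains keep x
            rw [Bool.eq_iff_iff]
            simp only [List.contains_iff_mem, PySem.Set.mem_discard]
            exact ⟨fun h => h.1, fun h => ⟨h, hxd⟩⟩
          have hIH := ih keep' hosnd hnd'
          rw [hfos, hlen'] at hIH
          set F := os.filter (fun x => PySem.Set.contains keep x) with hF
          rw [List.filter_append, List.filter_append, hIH]
          have h1 : [d].filter (fun x => PySem.Set.contains (pvTrimLoop os.reverse keep') x) = [] := by
            simp only [List.filter_cons, List.filter_nil, hcres]; simp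
          have h2 : [d].filter (fun x => PySem.Set.contains keep x) = [d] := by
            simp only [List.filter_cons, List.filter_nil, hc]; simp
          rw [h1, h2, List.append_nil]
          have hn : (F ++ [d]).length - (keep.length - 5) = F.length - (keep.length - 1 - 5) := by
            simp only [List.length_append, List.length_cons, List.length_nil]
            omega
          rw [hn, List.take_append_of_le_length (Nat.sub_le _ _)]
        · have hc : PySem.Set.contains keep d = false := by
            simpa [PySem.Set.contains, List.contains_iff_mem] using hdk
          rw [if_neg (by rw [hc]; exact Bool.false_ne_true)]
          have hdres : d ∉ pvTrimLoop os.reverse keep := fun h =>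
            hdk (pvTrimLoop_subset os.reverse keep d h)
          have hcres : PySem.Set.contains (pvTrimLoop os.reverse keep) d = false := by
            simpa [PySem.Set.contains, List.contains_iff_mem] using hdres
          have hIH := ih keep hosnd hnd
          rw [List.filter_append, List.filter_append, hIH]
          have h1 : [d].filter (fun x => PySem.Set.contains (pvTrimLoop os.reverse keep) x) = [] := by
            simp only [List.filter_cons, List.filter_nil, hcres]; simp
          have h2 : [d].filter (fun x => PySem.Set.contains keep x) = [] := by
            simp only [List.filter_cons, List.filter_nil, hc]; simp
          rw [h1, h2, List.append_nil, List.append_nil]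

-- B's port as a take of the canonical filtered list
theorem alt_eq_take (weekdays : List String) (hne : weekdays ≠ []) :
    trim_weekdays_alt weekdays
      = (pvWEEKDAY_ORDER.filter (fun d => PySem.Set.contains (PySem.Set.ofList weekdays) d)).take 5 := by
  simp only [trim_weekdays_alt, if_neg hne]
  rw [show pvMAX_DELIVERY_DAYS = ((5 : Nat) : Int) from rfl, PySem.List.slice_to_natCast]

-- A's port as a take of the canonical filtered list
theorem a_eq_take (weekdays : List String) (hne : weekdays ≠ []) :
    trim_weekdays weekdays
      = (pvWEEKDAY_ORDER.filter (fun d => PySem.Set.contains (PySem.Set.ofList weekdays) d)).take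
          ((pvWEEKDAY_ORDER.filter (fun d => PySem.Set.contains (PySem.Set.ofList weekdays) d)).length
            - ((PySem.Set.ofList weekdays).length - 5)) := by
  simp only [trim_weekdays, if_neg hne]
  exact pvTrimLoop_filter pvWEEKDAY_ORDER (PySem.Set.ofList weekdays) (by decide)
    (PySem.Set.nodup_ofList weekdays)

-- membership in the filtered canonical list
theorem mem_F (weekdays : List String) (x : String) :
    x ∈ pvWEEKDAY_ORDER.filter (fun d => PySem.Set.contains (PySem.Set.ofList weekdays) d)
      ↔ x ∈ pvWEEKDAY_ORDER ∧ x ∈ weekdays := by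
  simp [List.mem_filter, PySem.Set.contains, PySem.Set.mem_ofList]

theorem F_nodup (weekdays : List String) :
    (pvWEEKDAY_ORDER.filter (fun d => PySem.Set.contains (PySem.Set.ofList weekdays) d)).Nodup :=
  List.Nodup.filter _ (by decide)

theorem F_len_le (weekdays : List String) :
    (pvWEEKDAY_ORDER.filter (fun d => PySem.Set.contains (PySem.Set.ofList weekdays) d)).length
      ≤ (PySem.Set.ofList weekdays).length := by
  refine List.Subperm.length_le (List.subperm_of_subset (F_nodup weekdays) ?_)
  intro x hx
  exact (PySem.Set.mem_ofList _ _).2 ((mem_F weekdays x).1 hx).2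

theorem mem_order_iff (x : String) : x ∈ pvWEEKDAY_ORDER ↔ pvIsWeekdayName x = true := by
  simp only [pvWEEKDAY_ORDER, pvIsWeekdayName, List.mem_cons, List.not_mem_nil, or_false,
    Bool.or_eq_true, beq_iff_eq]
  tauto

-- ===== VERDICT (by name: the statement is the Claim_ definition above) =====
theorem trim_weekdays_spec : Claim_unchanged_trim_weekdays := by
  intro weekdays _ hnD
  by_cases hne : weekdays = []
  · simp [trim_weekdays, trim_weekdays_alt, hne]
  · rw [a_eq_take weekdays hne, alt_eq_take weekdays hne]
    set K := PySem.Set.ofList weekdays with hK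
    set F := pvWEEKDAY_ORDER.filter (fun d => PySem.Set.contains K d) with hF
    have hFK : F.length ≤ K.length := F_len_le weekdays
    have hKdedup : PySem.List.dedup weekdays = K := by
      rw [PySem.List.dedup_eq_ofList]
    by_cases h5 : K.length ≤ 5
    · have h0 : K.length - 5 = 0 := by omega
      rw [h0, Nat.sub_zero, List.take_length, List.take_of_length_le (by omega)]
    · by_cases hval : ∃ w ∈ weekdays, pvIsWeekdayName w = true
      · -- some valid entry: then no invalid entry, else D_ would hold
        have hnoinv : ∀ w ∈ weekdays, pvIsWeekdayName w = true := by
          intro w hw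
          by_contra h
          exact hnD ⟨by rw [hKdedup]; omega, hval, ⟨w, hw, by simpa using h⟩⟩
        have hKF : K.length ≤ F.length := by
          refine List.Subperm.length_le (List.subperm_of_subset (PySem.Set.nodup_ofList weekdays) ?_)
          intro x hx
          have hxw : x ∈ weekdays := (PySem.Set.mem_ofList _ _).1 hx
          exact (mem_F weekdays x).2 ⟨(mem_order_iff x).2 (hnoinv x hxw), hxw⟩
        have heq : F.length - (K.length - 5) = 5 := by omega
        rw [heq]
      · -- no valid weekday at all: F = []
        have hFnil : F = [] := by
          rcases List.eq_nil_or_concat F with h | ⟨l, x, hcx⟩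
          · exact h
          · have hxF : x ∈ F := by rw [hcx]; simp
            rw [hF] at hxF
            obtain ⟨h1, h2⟩ := (mem_F weekdays x).1 hxF
            exact absurd ⟨x, h2, (mem_order_iff x).1 h1⟩ hval
        rw [hFnil]; simp
  
theorem trim_weekdays_changed : Claim_changed_trim_weekdays := by
  unfold Claim_changed_trim_weekdays; decide

theorem trim_weekdays_tight : Claim_exact_trim_weekdays := by
  intro weekdays _ hD
  have hD' := hD
  unfold D_trim_weekdays at hD'
  obtain ⟨h5, ⟨v, hvw, hvname⟩, ⟨u, huw, huname⟩⟩ := hD'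
  have hne : weekdays ≠ [] := by
    intro h; rw [h] at hvw; cases hvw
  rw [a_eq_take weekdays hne, alt_eq_take weekdays hne]
  set K := PySem.Set.ofList weekdays with hK
  set F := pvWEEKDAY_ORDER.filter (fun d => PySem.Set.contains K d) with hF
  have hKdedup : (PySem.List.dedup weekdays).length = K.length := by
    rw [PySem.List.dedup_eq_ofList]
  rw [hKdedup] at h5
  -- the valid entry is in F
  have hvF : v ∈ F := (mem_F weekdays v).2 ⟨(mem_order_iff v).2 hvname, hvw⟩
  have hFpos : 1 ≤ F.length := List.length_pos_of_mem hvF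
  -- the invalid entry makes F strictly smaller than K
  have huK : u ∈ K := (PySem.Set.mem_ofList _ _).2 huw
  have huF : u ∉ F := fun h => by
    have := (mem_order_iff u).1 ((mem_F weekdays u).1 h).1
    rw [huname] at this; cases this
  have hFlt : F.length ≤ K.length - 1 := by
    have : F.length ≤ (PySem.Set.discard K u).length := by
      refine List.Subperm.length_le (List.subperm_of_subset (F_nodup weekdays) ?_)
      intro x hx
      refine (PySem.Set.mem_discard _ _ _).2 ⟨(PySem.Set.mem_ofList _ _).2 ((mem_F weekdays x).1 hx).2, ?_⟩
      intro hxu; exact huF (hxu ▸ hx)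
    rwa [length_discard_mem K u (PySem.Set.nodup_ofList weekdays) huK] at this
  intro hcontra
  have hlen := congrArg List.length hcontra
  simp only [List.length_take] at hlen
  omega
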